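-- pv_equiv track=rewrite | github.com/Brandon7771066/TI-Sigma-New | divination_empirical_testing.py | reduce_to_root
-- ===== SOURCE A (Python) =====
-- def reduce_to_root(n: int) -> int:
--     """Reduce number to root digit or master number"""
--     if n in [11, 22, 33]:
--         return n
--     while n > 9:
--         n = sum(int(d) for d in str(n))
--         if n in [11, 22, 33]:
--             return n
--     return n
-- ===== SOURCE B (Python) =====
-- def reduce_to_root(n: int) -> int:
--     """Reduce number to root digit or master number (recursive form)."""
--     if n in [11, 22, 33] or n <= 9:
--         return n
--     return reduce_to_root(sum(int(d) for d in str(n)))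
-- ===== Notes on version B (the rewrite author's own statement) =====
-- stated objective: simpler
-- what changed: Replaced A's while-loop with in-loop master-number early return by a direct tail recursion on the digit sum with a single combined stopping condition.
import Mathlib
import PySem

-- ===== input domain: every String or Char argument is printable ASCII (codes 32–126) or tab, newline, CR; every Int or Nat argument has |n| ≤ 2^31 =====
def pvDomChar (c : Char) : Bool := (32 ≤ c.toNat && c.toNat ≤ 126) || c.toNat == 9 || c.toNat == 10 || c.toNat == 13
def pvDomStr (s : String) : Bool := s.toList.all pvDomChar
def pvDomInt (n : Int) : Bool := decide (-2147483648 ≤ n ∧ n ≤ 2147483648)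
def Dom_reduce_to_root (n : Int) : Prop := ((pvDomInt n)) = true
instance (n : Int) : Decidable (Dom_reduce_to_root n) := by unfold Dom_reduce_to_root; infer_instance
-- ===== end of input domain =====

-- B replaces A's while-loop (with its in-loop master-number early return) by a direct
-- tail recursion with one combined stopping condition; same cost, simpler shape.

-- sum(int(d) for d in str(n)) — shared by both sources verbatim; int(d) ported via
-- PySem.Int.ofChars? (exact on the digit characters this is applied to: n > 9, so no '-')
def pyDigitSum (n : Int) : Int :=
  ((PySem.Int.toChars n).map (fun c => (PySem.Int.ofChars? [c]).getD 0)).sum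

-- ===== PORT A =====
-- A's while loop, fuel-encoded (fuel n.toNat + 1 always suffices: the digit sum of a
-- number > 9 is strictly smaller, so the loop terminates; fuel exhaustion is unreachable)
def reduceLoopA (fuel : Nat) (n : Int) : Int :=
  if n ≤ 9 then n
  else match fuel with
    | 0 => n
    | f + 1 =>
      if pyDigitSum n = 11 ∨ pyDigitSum n = 22 ∨ pyDigitSum n = 33
      then pyDigitSum n else reduceLoopA f (pyDigitSum n)

def reduce_to_root (n : Int) : Int :=
  if n = 11 ∨ n = 22 ∨ n = 33 then n else reduceLoopA (n.toNat + 1) n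

-- ===== PORT B =====
-- Source B's recursion, fuel-encoded with the same (sufficient) fuel
def reduceRecB (fuel : Nat) (n : Int) : Int :=
  if n = 11 ∨ n = 22 ∨ n = 33 ∨ n ≤ 9 then n
  else match fuel with
    | 0 => n
    | f + 1 => reduceRecB f (pyDigitSum n)

def reduce_to_root_alt (n : Int) : Int := reduceRecB (n.toNat + 1) n

-- ===== PRECONDITION & SPEC =====
def Spec_reduce_to_root (n : Int) (out : Int) : Prop := out = reduce_to_root_alt n
instance (n : Int) (out : Int) : Decidable (Spec_reduce_to_root n out) := by unfold Spec_reduce_to_root; infer_instance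

-- ===== CLAIM (what is proved, stated in full; the proofs are below) =====
def Claim_equal_reduce_to_root : Prop := ∀ (n : Int), Dom_reduce_to_root n → Spec_reduce_to_root n (reduce_to_root n)

-- ===== LEMMAS AND PROOFS =====
theorem loop_eq_rec (f : Nat) : ∀ n : Int, ¬ (n = 11 ∨ n = 22 ∨ n = 33) →
    reduceLoopA f n = reduceRecB f n := by
  induction f with
  | zero =>
    intro n hn
    unfold reduceLoopA reduceRecB
    split_ifs <;> rfl
  | succ f ih =>
    intro n hn
    have hcond : ¬ (n = 11 ∨ n = 22 ∨ n = 33 ∨ n ≤ 9) ↔ ¬ n ≤ 9 := by tauto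
    unfold reduceLoopA reduceRecB
    by_cases h9 : n ≤ 9
    · rw [if_pos h9, if_pos (by tauto)]
    · rw [if_neg h9, if_neg (hcond.mpr h9)]
      show (if pyDigitSum n = 11 ∨ pyDigitSum n = 22 ∨ pyDigitSum n = 33
            then pyDigitSum n else reduceLoopA f (pyDigitSum n)) = reduceRecB f (pyDigitSum n)
      by_cases hm : pyDigitSum n = 11 ∨ pyDigitSum n = 22 ∨ pyDigitSum n = 33
      · rw [if_pos hm]
        unfold reduceRecB
        rw [if_pos (by tauto)]
      · rw [if_neg hm]
        exact ih _ hm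

-- ===== VERDICT (by name: the statement is the Claim_ definition above) =====
theorem reduce_to_root_spec : Claim_equal_reduce_to_root := by
  intro n _
  unfold Spec_reduce_to_root reduce_to_root reduce_to_root_alt
  by_cases hm : n = 11 ∨ n = 22 ∨ n = 33
  · have : n = 11 ∨ n = 22 ∨ n = 33 ∨ n ≤ 9 := by tauto
    simp [hm, reduceRecB, this]
  · rw [if_neg hm, loop_eq_rec _ _ hm]
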